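-- pv_equiv track=rewrite | github.com/AlessandroBonomo28/advent-of-code-23 | day 7/pt2.py | calculate_power_with_jollys
-- ===== SOURCE A (Python) =====
-- def calculate_power_with_jollys(power,jollys):
--     if jollys ==0:
--         return power
--     if power == 1:
--         return calculate_power_with_jollys(2,jollys-1)
--     elif power == 2:
--         return calculate_power_with_jollys(4,jollys-1)
--     elif power == 3:
--         return calculate_power_with_jollys(6,jollys-1)
--     elif power == 4:
--         return calculate_power_with_jollys(6,jollys-1)
--     elif power == 5:
--         return calculate_power_with_jollys(7,jollys-1)
--     else:
--         return power
-- ===== SOURCE B (Python) =====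
-- _NEXT = {1: 2, 2: 4, 3: 6, 4: 6, 5: 7}
--
-- def calculate_power_with_jollys(power, jollys):
--     while jollys != 0 and power in _NEXT:
--         power = _NEXT[power]
--         jollys -= 1
--     return power
-- ===== Notes on version B (the rewrite author's own statement) =====
-- stated objective: idiomatic
-- what changed: Replaced the six-branch tail recursion with an iterative while loop driven by a transition dictionary {1:2,2:4,3:6,4:6,5:7}.
import Mathlib
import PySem

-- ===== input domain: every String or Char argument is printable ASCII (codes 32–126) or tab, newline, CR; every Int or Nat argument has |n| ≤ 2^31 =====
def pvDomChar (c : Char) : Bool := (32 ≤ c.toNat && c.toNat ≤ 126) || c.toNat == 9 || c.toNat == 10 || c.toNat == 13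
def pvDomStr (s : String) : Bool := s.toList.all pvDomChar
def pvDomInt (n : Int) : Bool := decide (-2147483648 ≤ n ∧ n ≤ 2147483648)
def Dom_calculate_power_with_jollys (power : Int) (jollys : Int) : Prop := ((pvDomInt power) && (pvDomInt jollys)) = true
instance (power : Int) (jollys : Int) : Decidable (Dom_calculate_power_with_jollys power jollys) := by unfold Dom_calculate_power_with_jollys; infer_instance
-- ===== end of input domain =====

-- B replaces A's six-branch tail recursion by an iterative while loop over a transition dictionary; same values everywhere (idiomatic, not faster).

-- length of the transition chain starting at p (termination measure for both ports)
def pvChainLen (p : Int) : Nat :=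
  if p = 1 then 3 else if p = 2 then 2 else if p = 3 ∨ p = 4 ∨ p = 5 then 1 else 0

-- ===== PORT A =====
def calculate_power_with_jollys (power : Int) (jollys : Int) : Int :=
  if jollys = 0 then power
  else if power = 1 then calculate_power_with_jollys 2 (jollys - 1)
  else if power = 2 then calculate_power_with_jollys 4 (jollys - 1)
  else if power = 3 then calculate_power_with_jollys 6 (jollys - 1)
  else if power = 4 then calculate_power_with_jollys 6 (jollys - 1)
  else if power = 5 then calculate_power_with_jollys 7 (jollys - 1)
  else power
termination_by pvChainLen power
decreasing_by all_goals simp_all [pvChainLen]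

-- ===== PORT B =====
-- Source B's _NEXT transition dictionary
def pvTable : PySem.Dict Int Int := PySem.Dict.ofList [((1:Int),(2:Int)), (2,4), (3,6), (4,6), (5,7)]

-- what _NEXT lookup computes, cited by the termination proof of the loop below
theorem pvTable_get? (p : Int) : pvTable.get? p =
    if p = 1 then some 2 else if p = 2 then some 4 else if p = 3 then some 6
    else if p = 4 then some 6 else if p = 5 then some 7 else none := by
  have h : pvTable = PySem.Dict.mk [((1:Int),(2:Int)), (2,4), (3,6), (4,6), (5,7)] := by decide
  rw [h]
  simp only [PySem.Dict.get?_mk_cons]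
  split_ifs <;> simp_all [PySem.Dict.get?]

-- Source B's while loop: while jollys != 0 and power in _NEXT: power = _NEXT[power]; jollys -= 1
-- ('power in _NEXT' and the lookup are combined into one get?, the natural Lean form of the test-then-index pair)
def calculate_power_with_jollys_alt (power : Int) (jollys : Int) : Int :=
  if jollys = 0 then power
  else
    match h : pvTable.get? power with
    | none => power
    | some p' => calculate_power_with_jollys_alt p' (jollys - 1)
termination_by pvChainLen power
decreasing_by
  rw [pvTable_get?] at h
  split_ifs at h <;>
    first
    | exact Option.noConfusion h
    | (injection h with h; subst h; simp_all [pvChainLen])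

-- ===== PRECONDITION & SPEC =====
def Spec_calculate_power_with_jollys (power : Int) (jollys : Int) (out : Int) : Prop := out = calculate_power_with_jollys_alt power jollys
instance (power : Int) (jollys : Int) (out : Int) : Decidable (Spec_calculate_power_with_jollys power jollys out) := by unfold Spec_calculate_power_with_jollys; infer_instance

-- ===== CLAIM (what is proved, stated in full; the proofs are below) =====
def Claim_equal_calculate_power_with_jollys : Prop := ∀ (power : Int) (jollys : Int), Dom_calculate_power_with_jollys power jollys → Spec_calculate_power_with_jollys power jollys (calculate_power_with_jollys power jollys)

-- ===== LEMMAS AND PROOFS =====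
theorem pv_alt_step (p p' j : Int) (hj : ¬ j = 0) (hp : pvTable.get? p = some p') :
    calculate_power_with_jollys_alt p j = calculate_power_with_jollys_alt p' (j - 1) := by
  rw [calculate_power_with_jollys_alt]
  simp only [hj, if_false]
  split <;> simp_all

theorem pv_alt_stop (p j : Int) (hp : pvTable.get? p = none) :
    calculate_power_with_jollys_alt p j = p := by
  rw [calculate_power_with_jollys_alt]
  split
  · rfl
  · split <;> simp_all

theorem pv_eq (power jollys : Int) :
    calculate_power_with_jollys power jollys = calculate_power_with_jollys_alt power jollys := by
  induction power, jollys using calculate_power_with_jollys.induct with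
  | case1 p =>
      rw [calculate_power_with_jollys, calculate_power_with_jollys_alt]
      simp
  | case2 j h ih =>
      rw [calculate_power_with_jollys]
      rw [pv_alt_step 1 2 j h (by rw [pvTable_get?]; simp)]
      simp [h, ih]
  | case3 j h h1 ih =>
      rw [calculate_power_with_jollys]
      rw [pv_alt_step 2 4 j h (by rw [pvTable_get?]; simp)]
      simp [h, ih]
  | case4 j h h1 h2 ih =>
      rw [calculate_power_with_jollys]
      rw [pv_alt_step 3 6 j h (by rw [pvTable_get?]; simp)]
      simp [h, ih]
  | case5 j h h1 h2 h3 ih =>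
      rw [calculate_power_with_jollys]
      rw [pv_alt_step 4 6 j h (by rw [pvTable_get?]; simp)]
      simp [h, ih]
  | case6 j h h1 h2 h3 h4 ih =>
      rw [calculate_power_with_jollys]
      rw [pv_alt_step 5 7 j h (by rw [pvTable_get?]; simp)]
      simp [h, ih]
  | case7 p j h h1 h2 h3 h4 h5 =>
      rw [calculate_power_with_jollys]
      rw [pv_alt_stop p j (by rw [pvTable_get?]; simp [h1, h2, h3, h4, h5])]
      simp [h, h1, h2, h3, h4, h5]

-- ===== VERDICT (by name: the statement is the Claim_ definition above) =====
theorem calculate_power_with_jollys_spec : Claim_equal_calculate_power_with_jollys := by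
  intro power jollys _
  unfold Spec_calculate_power_with_jollys
  exact pv_eq power jollys
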